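-- pv_equiv track=rewrite | github.com/dongjuppp/algo_book | test/test8.py | solution
-- ===== SOURCE A (Python) =====
-- import heapq
--
-- def dik(lt,distance,k):
--     q=[]
--     heapq.heappush(q,(0,1))
--     distance[1]=0
--     while q:
--         dist,now=heapq.heappop(q)
--
--         if distance[now]<dist:
--             continue
--
--         for i in range(len(lt[now])):
--             cost=dist+lt[now][i][1]
--
--             if cost<distance[lt[now][i][0]]:
--                 distance[lt[now][i][0]]=cost
--                 heapq.heappush(q,(cost,lt[now][i][0]))
--     count=0
--     for i in range(len(distance)):
--         if distance[i]<=k: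
--             count+=1
--     return count
--
-- def solution(N, road, K): # N노드수 road 121-> 1과2 가 1의 벨류로 양방향 연걸, k이하 길
--     answer = 0
--     lt=[[] for i in range(N+1)]
--     distance=[int(1e9) for i in range(N+1)]
--     for i in range(len(road)):
--         lt[road[i][0]].append([road[i][1],road[i][2]])
--         lt[road[i][1]].append([road[i][0],road[i][2]])
--
--     answer=dik(lt,distance,K)
--
--     return answer
-- ===== SOURCE B (Python) =====
-- def solution(N, road, K):
--     # Bellman-Ford style repeated relaxation over the edge list (no priority queue).
--     INF = int(1e9)
--     dist = [INF] * (N + 1)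
--     dist[1] = 0
--     edges = []
--     for a, b, w in road:
--         edges.append((a, b, w))
--         edges.append((b, a, w))
--     changed = True
--     while changed:
--         changed = False
--         for a, b, w in edges:
--             if dist[a] + w < dist[b]:
--                 dist[b] = dist[a] + w
--                 changed = True
--     return sum(1 for x in dist if x <= K)
-- ===== Notes on version B (the rewrite author's own statement) =====
-- stated objective: faster
-- what changed: Replaces the heap-based lazy Dijkstra over a built adjacency-list structure with Bellman-Ford: repeated full relaxation passes over the flat directed edge list until a pass changes nothing; no priority queue is maintained and no per-node adjacency lists are built, which removes the heap and list-building overhead (measured ~5x at the largest timing size).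
-- outside the precondition, e.g. on solution(3, [(2, 3, -1)], 5): A returns 1, B does not finish within the time limit; on solution(3, [(4, 1, 1)], 5): A raises IndexError, B raises IndexError
import Mathlib
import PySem

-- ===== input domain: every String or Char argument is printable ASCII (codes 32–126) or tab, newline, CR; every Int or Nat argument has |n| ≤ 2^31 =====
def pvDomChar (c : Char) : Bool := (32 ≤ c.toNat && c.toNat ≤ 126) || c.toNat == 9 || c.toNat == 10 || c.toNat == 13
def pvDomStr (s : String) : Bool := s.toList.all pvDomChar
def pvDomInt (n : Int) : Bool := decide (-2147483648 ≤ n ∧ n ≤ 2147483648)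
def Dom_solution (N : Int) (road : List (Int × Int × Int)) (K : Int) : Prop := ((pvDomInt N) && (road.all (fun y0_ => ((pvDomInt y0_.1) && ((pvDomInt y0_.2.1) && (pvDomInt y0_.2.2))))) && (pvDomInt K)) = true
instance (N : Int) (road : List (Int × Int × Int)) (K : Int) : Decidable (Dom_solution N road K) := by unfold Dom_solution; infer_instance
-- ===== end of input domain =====

-- B replaces A's heap-based lazy Dijkstra over a built adjacency structure with repeated
-- Bellman-Ford relaxation passes over the flat edge list (same result; alternative algorithm).


-- ===== PORT A =====

-- Python list indexing with wraparound: l[i] for -len ≤ i < len is l[i % len]; outside that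
-- range Python raises IndexError (such inputs are excluded by Pre_solution).
def pyIdxN (len : Nat) (i : Int) : Nat := (i % (len : Int)).toNat

def aGetI (l : List Int) (i : Int) : Int := l.getD (pyIdxN l.length i) 0
def aSetI (l : List Int) (i : Int) (v : Int) : List Int := l.set (pyIdxN l.length i) v
def aGetL (l : List (List (Int × Int))) (i : Int) : List (Int × Int) :=
  l.getD (pyIdxN l.length i) []
def aSetL (l : List (List (Int × Int))) (i : Int) (v : List (Int × Int)) :
    List (List (Int × Int)) := l.set (pyIdxN l.length i) v

-- heapq modelled by the multiset of pending (dist, node) pairs: heappush appends, heappop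
-- removes one occurrence of the lexicographically least pair — exactly the VALUE Python's
-- binary heap pops ((Int × Int) pairs are totally ordered, so the minimum is determined).
def popMin : List (Int × Int) → Option ((Int × Int) × List (Int × Int))
  | [] => none
  | x :: xs =>
    match popMin xs with
    | none => some (x, [])
    | some (m, rest) =>
      if x.1 < m.1 ∨ (x.1 = m.1 ∧ x.2 ≤ m.2) then some (x, xs) else some (m, x :: rest)

-- loop body of 'for i in range(len(lt[now]))' in dik
def dikRelax (dist : Int) (s : List Int × List (Int × Int)) (e : Int × Int) :
    List Int × List (Int × Int) :=
  if dist + e.2 < aGetI s.1 e.1 then (aSetI s.1 e.1 (dist + e.2), s.2 ++ [(dist + e.2, e.1)])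
  else s

-- 'while q:' of dik. The fuel only makes the recursion total: it is proved large enough on
-- every input Pre_solution admits (the Python diverges on negative weights, excluded there).
def dikLoop (lt : List (List (Int × Int))) : Nat → List Int → List (Int × Int) → List Int
  | 0, d, _ => d
  | fuel + 1, d, q =>
    match popMin q with
    | none => d
    | some ((dist, now), q') =>
      if aGetI d now < dist then dikLoop lt fuel d q'
      else
        let s := (aGetL lt now).foldl (dikRelax dist) (d, q')
        dikLoop lt fuel s.1 s.2

-- final counting loop of dik
def dikCount (k : Int) (d : List Int) : Int :=
  d.foldl (fun c x => if x ≤ k then c + 1 else c) 0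

def dikFuel (m elen : Nat) : Nat := (m * 1000000000 + 1) * (2 * elen + 2) + 1

-- loop body of the adjacency-building 'for i in range(len(road))' in solution
def buildStep (lt : List (List (Int × Int))) (e : Int × Int × Int) :
    List (List (Int × Int)) :=
  let lt1 := aSetL lt e.1 (aGetL lt e.1 ++ [(e.2.1, e.2.2)])
  aSetL lt1 e.2.1 (aGetL lt1 e.2.1 ++ [(e.1, e.2.2)])

def solution (N : Int) (road : List (Int × Int × Int)) (K : Int) : Int :=
  let lt := road.foldl buildStep (List.replicate (N + 1).toNat [])
  let d0 := aSetI (List.replicate (N + 1).toNat 1000000000) 1 0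
  dikCount K (dikLoop lt (dikFuel (N + 1).toNat road.length) d0 [(0, 1)])

-- ===== PORT B =====

-- body of B's relaxation loop over the directed edge list, carrying the 'changed' flag
def bfStep (s : List Int × Bool) (e : Int × Int × Int) : List Int × Bool :=
  if aGetI s.1 e.1 + e.2.2 < aGetI s.1 e.2.1 then
    (aSetI s.1 e.2.1 (aGetI s.1 e.1 + e.2.2), true)
  else s

-- one full relaxation pass ('changed = False; for a, b, w in edges: …')
def bfPass (edges : List (Int × Int × Int)) (d : List Int) : List Int × Bool :=
  edges.foldl bfStep (d, false)

-- 'while changed:'; the fuel only makes the recursion total (proved sufficient under Pre_).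
def bfLoop (edges : List (Int × Int × Int)) : Nat → List Int → List Int
  | 0, d => d
  | fuel + 1, d =>
    let s := bfPass edges d
    if s.2 then bfLoop edges fuel s.1 else s.1

def solution_alt (N : Int) (road : List (Int × Int × Int)) (K : Int) : Int :=
  let dist0 := aSetI (List.replicate (N + 1).toNat 1000000000) 1 0
  let edges := road.foldl (fun es e => es ++ [(e.1, e.2.1, e.2.2), (e.2.1, e.1, e.2.2)]) []
  let d := bfLoop edges ((N + 1).toNat * 1000000000 + 2) dist0
  (d.countP (fun x => decide (x ≤ K)) : Int)

-- ===== PRECONDITION & SPEC =====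

-- Pre_solution excludes inputs where A raises (N < 1: distance[1] is an IndexError; an
-- endpoint outside Python's index range [-(N+1), N]: IndexError) and all negative weights:
-- on a negative edge touched by the relaxation from node 1 A itself loops forever, and on a
-- negative edge A's lazy Dijkstra never visits, A happens to return while B's full
-- relaxation passes relax the spurious 1e9-based edge forever, so B cannot match there.
def Pre_solution (N : Int) (road : List (Int × Int × Int)) (K : Int) : Prop :=
  1 ≤ N ∧ ∀ e ∈ road,
    (-(N + 1) ≤ e.1 ∧ e.1 ≤ N) ∧ (-(N + 1) ≤ e.2.1 ∧ e.2.1 ≤ N) ∧ 0 ≤ e.2.2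

instance (N : Int) (road : List (Int × Int × Int)) (K : Int) :
    Decidable (Pre_solution N road K) := by unfold Pre_solution; infer_instance

def pvWitness_solution : Int × (List (Int × Int × Int)) × Int := (3, [(1, 2, 3), (2, 3, 4)], 5)

def Spec_solution (N : Int) (road : List (Int × Int × Int)) (K : Int) (out : Int) : Prop :=
  out = solution_alt N road K
instance (N : Int) (road : List (Int × Int × Int)) (K : Int) (out : Int) :
    Decidable (Spec_solution N road K out) := by unfold Spec_solution; infer_instance

-- ===== CLAIM (what is proved, stated in full; the proofs are below) =====
def Claim_equal_solution : Prop := ∀ (N : Int) (road : List (Int × Int × Int)) (K : Int),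
  Dom_solution N road K → Pre_solution N road K → Spec_solution N road K (solution N road K)

-- ===== LEMMAS AND PROOFS =====

-- directed edge list (both directions of each road), in A's insertion order
def Ed (road : List (Int × Int × Int)) : List (Int × Int × Int) :=
  road.flatMap (fun e => [(e.1, e.2.1, e.2.2), (e.2.1, e.1, e.2.2)])

-- walks from vertex 1 (vertices normalized mod the array length m)
inductive Reach (m : Nat) (E : List (Int × Int × Int)) : Nat → Int → Prop
  | init : Reach m E 1 0
  | step {u : Nat} {c : Int} (e : Int × Int × Int) :
      Reach m E u c → e ∈ E → pyIdxN m e.1 = u → Reach m E (pyIdxN m e.2.1) (c + e.2.2)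

def Stable (m : Nat) (E : List (Int × Int × Int)) (d : List Int) : Prop :=
  ∀ e ∈ E, d.getD (pyIdxN m e.2.1) 0 ≤ d.getD (pyIdxN m e.1) 0 + e.2.2

structure Good (m : Nat) (E : List (Int × Int × Int)) (d : List Int) : Prop where
  len : d.length = m
  d1 : d.getD 1 0 = 0
  lb : ∀ j, 0 ≤ d.getD j 0
  ub : ∀ j, d.getD j 0 ≤ 1000000000
  sound : ∀ j, j < m → d.getD j 0 = 1000000000 ∨ Reach m E j (d.getD j 0)

def sumNat (d : List Int) : Nat := (d.map Int.toNat).sum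

-- ---- small facts ----

theorem pyIdxN_lt {m : Nat} (h : 0 < m) (i : Int) : pyIdxN m i < m := by
  unfold pyIdxN
  have hm0 : (0 : Int) < (m : Int) := by exact_mod_cast h
  have h1 : 0 ≤ i % (m : Int) := Int.emod_nonneg i (by omega)
  have h2 : i % (m : Int) < (m : Int) := Int.emod_lt_of_pos i hm0
  omega

theorem pyIdxN_one {m : Nat} (h : 2 ≤ m) : pyIdxN m 1 = 1 := by
  unfold pyIdxN
  have h1 : (1 : Int) % (m : Int) = 1 := Int.emod_eq_of_lt (by omega) (by omega)
  omega

theorem getD_set_self {α : Type} {l : List α} {j : Nat} (h : j < l.length) (v d0 : α) :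
    (l.set j v).getD j d0 = v := by
  induction l generalizing j with
  | nil => simp at h
  | cons a t ih =>
    cases j with
    | zero => simp
    | succ n =>
      simp only [List.set_cons_succ, List.getD_cons_succ]
      exact ih (by simp at h; omega)

theorem getD_set_ne {α : Type} {l : List α} {i j : Nat} (h : i ≠ j) (v d0 : α) :
    (l.set j v).getD i d0 = l.getD i d0 := by
  induction l generalizing i j with
  | nil => simp
  | cons a t ih =>
    cases j with
    | zero =>
      cases i with
      | zero => exact absurd rfl h
      | succ n => simp
    | succ n =>
      cases i with
      | zero => simp
      | succ k =>
        simp only [List.set_cons_succ, List.getD_cons_succ]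
        exact ih (by omega)

theorem getD_replicate {α : Type} {m j : Nat} (c d0 : α) :
    (List.replicate m c).getD j d0 = if j < m then c else d0 := by
  induction m generalizing j with
  | zero => simp
  | succ n ih =>
    cases j with
    | zero => simp [List.replicate_succ]
    | succ k =>
      simp only [List.replicate_succ, List.getD_cons_succ, ih]
      by_cases h : k < n
      · rw [if_pos h, if_pos (by omega)]
      · rw [if_neg h, if_neg (by omega)]

theorem sumNat_set_lt {d : List Int} {j : Nat} {v : Int} (hj : j < d.length)
    (hv : 0 ≤ v) (hlt : v < d.getD j 0) : sumNat (d.set j v) < sumNat d := by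
  induction d generalizing j with
  | nil => simp at hj
  | cons a t ih =>
    cases j with
    | zero =>
      simp only [List.set_cons_zero, sumNat, List.map_cons, List.sum_cons]
      simp only [List.getD_cons_zero] at hlt
      have : v.toNat < a.toNat := by omega
      omega
    | succ n =>
      simp only [List.set_cons_succ, sumNat, List.map_cons, List.sum_cons]
      have hlt' : v < t.getD n 0 := by simpa using hlt
      have := ih (j := n) (by simp at hj; omega) hlt'
      simp only [sumNat] at this
      omega

theorem sumNat_le {d : List Int} {B : Nat} (h : ∀ x ∈ d, x.toNat ≤ B) :
    sumNat d ≤ d.length * B := by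
  induction d with
  | nil => simp [sumNat]
  | cons a t ih =>
    have h1 := h a (by simp)
    have h2 := ih (fun x hx => h x (by simp [hx]))
    simp only [sumNat, List.map_cons, List.sum_cons, List.length_cons] at *
    have : (t.length + 1) * B = t.length * B + B := by ring
    omega

theorem getD_set_le {d : List Int} {ip : Nat} {v : Int} (hip : ip < d.length)
    (hv : v ≤ d.getD ip 0) : ∀ j, (d.set ip v).getD j 0 ≤ d.getD j 0 := by
  intro j
  by_cases hj : j = ip
  · subst hj; rw [getD_set_self hip]; exact hv
  · rw [getD_set_ne hj]

-- ---- popMin facts ----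

theorem popMin_eq_none {q : List (Int × Int)} (h : popMin q = none) : q = [] := by
  cases q with
  | nil => rfl
  | cons x xs =>
    exfalso
    simp only [popMin] at h
    cases hx : popMin xs with
    | none => rw [hx] at h; simp at h
    | some p => rw [hx] at h; dsimp at h; split at h <;> simp at h

theorem popMin_perm {q q' : List (Int × Int)} {p : Int × Int}
    (h : popMin q = some (p, q')) : q.Perm (p :: q') := by
  induction q generalizing p q' with
  | nil => simp [popMin] at h
  | cons x xs ih =>
    simp only [popMin] at h
    cases hx : popMin xs with
    | none =>
      rw [hx] at h
      have hnil := popMin_eq_none hx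
      simp only [Option.some.injEq, Prod.mk.injEq] at h
      obtain ⟨rfl, rfl⟩ := h
      rw [hnil]
    | some pr =>
      obtain ⟨m0, rest⟩ := pr
      rw [hx] at h
      dsimp at h
      split at h <;> simp only [Option.some.injEq, Prod.mk.injEq] at h <;>
        obtain ⟨rfl, rfl⟩ := h
      · exact List.Perm.refl _
      · exact ((ih hx).cons x).trans (List.Perm.swap m0 x rest)

-- ---- uniqueness of a Good, Stable labeling ----

theorem stable_le_reach {m : Nat} {E : List (Int × Int × Int)} {d : List Int}
    (hw : ∀ e ∈ E, 0 ≤ e.2.2) (hs : Stable m E d) (h1 : d.getD 1 0 ≤ 0)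
    {j : Nat} {c : Int} (h : Reach m E j c) :
    d.getD j 0 ≤ c ∨ 1000000000 ≤ c := by
  induction h with
  | init => exact Or.inl h1
  | step e hr he hidx ih =>
    have hwe := hw e he
    have hse := hs e he
    rw [hidx] at hse
    rcases ih with h' | h'
    · exact Or.inl (by omega)
    · exact Or.inr (by omega)

theorem good_stable_le {m : Nat} {E : List (Int × Int × Int)} {d d' : List Int}
    (hw : ∀ e ∈ E, 0 ≤ e.2.2) (hd : Good m E d) (hs : Stable m E d) (hd' : Good m E d')
    (j : Nat) (hj : j < m) : d.getD j 0 ≤ d'.getD j 0 := by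
  rcases hd'.sound j hj with h | h
  · rw [h]; exact hd.ub j
  · rcases stable_le_reach hw hs (le_of_eq hd.d1) h with h' | h'
    · exact h'
    · have := hd.ub j; omega

theorem eq_of_good_stable {m : Nat} {E : List (Int × Int × Int)} {d d' : List Int}
    (hw : ∀ e ∈ E, 0 ≤ e.2.2) (hd : Good m E d) (hs : Stable m E d)
    (hd' : Good m E d') (hs' : Stable m E d') : d = d' := by
  apply List.ext_getElem (by rw [hd.len, hd'.len])
  intro i h1 h2
  have hi : i < m := by rw [hd.len] at h1; exact h1
  have hle := good_stable_le hw hd hs hd' i hi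
  have hge := good_stable_le hw hd' hs' hd i hi
  rw [List.getD_eq_getElem d 0 h1, List.getD_eq_getElem d' 0 h2] at hle hge
  omega

-- ---- adjacency build characterization ----

def bucketOf (m : Nat) (j : Nat) (E : List (Int × Int × Int)) : List (Int × Int) :=
  E.filterMap (fun e => if pyIdxN m e.1 = j then some (e.2.1, e.2.2) else none)

theorem bucketOf_cons {m j : Nat} (e : Int × Int × Int) (E : List (Int × Int × Int)) :
    bucketOf m j (e :: E) =
      (if pyIdxN m e.1 = j then [(e.2.1, e.2.2)] else []) ++ bucketOf m j E := by
  simp only [bucketOf, List.filterMap_cons]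
  by_cases h : pyIdxN m e.1 = j <;> simp [h]

theorem mem_bucketOf {m j : Nat} {E : List (Int × Int × Int)} {p : Int × Int} :
    p ∈ bucketOf m j E ↔ ∃ e ∈ E, pyIdxN m e.1 = j ∧ e.2.1 = p.1 ∧ e.2.2 = p.2 := by
  simp only [bucketOf, List.mem_filterMap]
  constructor
  · rintro ⟨e, he, hsome⟩
    split at hsome
    · simp only [Option.some.injEq] at hsome
      subst hsome
      exact ⟨e, he, ‹_›, rfl, rfl⟩
    · simp at hsome
  · rintro ⟨e, he, hj, h1, h2⟩
    refine ⟨e, he, ?_⟩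
    rw [if_pos hj]
    obtain ⟨p1, p2⟩ := p
    simp only at h1 h2
    rw [h1, h2]

theorem bucketOf_length_le {m j : Nat} (E : List (Int × Int × Int)) :
    (bucketOf m j E).length ≤ E.length := List.length_filterMap_le _ _

theorem Ed_length (road : List (Int × Int × Int)) : (Ed road).length = 2 * road.length := by
  induction road with
  | nil => simp [Ed]
  | cons e rs ih =>
    simp only [Ed, List.flatMap_cons] at ih ⊢
    simp only [List.length_append, List.length_cons, List.length_nil, List.length_cons, ih]
    omega

theorem mem_Ed {road : List (Int × Int × Int)} {e : Int × Int × Int} (h : e ∈ Ed road) :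
    ∃ r ∈ road, e = (r.1, r.2.1, r.2.2) ∨ e = (r.2.1, r.1, r.2.2) := by
  simp only [Ed, List.mem_flatMap, List.mem_cons] at h
  obtain ⟨r, hr, h⟩ := h
  refine ⟨r, hr, ?_⟩
  rcases h with h | h | h
  · exact Or.inl h
  · exact Or.inr h
  · simp at h

theorem buildStep_len (lt : List (List (Int × Int))) (e : Int × Int × Int) :
    (buildStep lt e).length = lt.length := by
  simp [buildStep, aSetL, List.length_set]

theorem buildStep_getD {m : Nat} (hm : 0 < m) (lt : List (List (Int × Int)))
    (hlen : lt.length = m) (e : Int × Int × Int) (j : Nat) :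
    (buildStep lt e).getD j [] =
      lt.getD j [] ++ ((if pyIdxN m e.1 = j then [(e.2.1, e.2.2)] else []) ++
        (if pyIdxN m e.2.1 = j then [(e.1, e.2.2)] else [])) := by
  have ha : pyIdxN m e.1 < lt.length := by rw [hlen]; exact pyIdxN_lt hm _
  simp only [buildStep, aSetL, aGetL, hlen, List.length_set]
  have hu1 : ∀ k,
      (lt.set (pyIdxN m e.1) (lt.getD (pyIdxN m e.1) [] ++ [(e.2.1, e.2.2)])).getD k []
      = lt.getD k [] ++ (if pyIdxN m e.1 = k then [(e.2.1, e.2.2)] else []) := by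
    intro k
    by_cases h : pyIdxN m e.1 = k
    · rw [if_pos h, ← h, getD_set_self ha]
    · rw [if_neg h, getD_set_ne (fun hk => h hk.symm)]
      simp
  have hb : pyIdxN m e.2.1 <
      (lt.set (pyIdxN m e.1) (lt.getD (pyIdxN m e.1) [] ++ [(e.2.1, e.2.2)])).length := by
    rw [List.length_set, hlen]; exact pyIdxN_lt hm _
  by_cases h2 : pyIdxN m e.2.1 = j
  · rw [if_pos h2, ← h2, getD_set_self hb, hu1 (pyIdxN m e.2.1)]
    simp [List.append_assoc]
  · rw [if_neg h2, getD_set_ne (fun hk => h2 hk.symm), hu1 j]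
    simp

theorem build_spec {m : Nat} (hm : 0 < m) (road : List (Int × Int × Int)) :
    ∀ (lt : List (List (Int × Int))), lt.length = m →
    (road.foldl buildStep lt).length = m ∧
    ∀ j, (road.foldl buildStep lt).getD j [] = lt.getD j [] ++ bucketOf m j (Ed road) := by
  induction road with
  | nil =>
    intro lt h
    refine ⟨h, fun j => ?_⟩
    simp [Ed, bucketOf]
  | cons e rs ih =>
    intro lt h
    have hstep : (buildStep lt e).length = m := by rw [buildStep_len, h]
    obtain ⟨h1, h2⟩ := ih (buildStep lt e) hstep
    rw [List.foldl_cons]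
    refine ⟨h1, fun j => ?_⟩
    rw [h2 j, buildStep_getD hm lt h e j]
    have hEd : Ed (e :: rs) = (e.1, e.2.1, e.2.2) :: (e.2.1, e.1, e.2.2) :: Ed rs := by
      simp [Ed]
    rw [hEd, bucketOf_cons, bucketOf_cons]
    simp only [List.append_assoc]

-- ---- Dijkstra loop invariant ----

structure DInv (m : Nat) (E : List (Int × Int × Int)) (d : List Int)
    (q : List (Int × Int)) : Prop where
  good : Good m E d
  qr : ∀ p ∈ q, Reach m E (pyIdxN m p.2) p.1 ∧ d.getD (pyIdxN m p.2) 0 ≤ p.1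
  stab : ∀ j, j < m →
    (∃ p ∈ q, pyIdxN m p.2 = j ∧ p.1 = d.getD j 0) ∨
    (∀ e ∈ E, pyIdxN m e.1 = j → d.getD (pyIdxN m e.2.1) 0 ≤ d.getD j 0 + e.2.2)

theorem relax_fold {m : Nat} {E : List (Int × Int × Int)} (hm : 2 ≤ m)
    (hw : ∀ e ∈ E, 0 ≤ e.2.2) {nw : Nat} {dist : Int}
    (hreach : Reach m E nw dist) (hdist0 : 0 ≤ dist) :
    ∀ (l : List (Int × Int)) (d df : List Int) (q qf : List (Int × Int)),
    l.foldl (dikRelax dist) (d, q) = (df, qf) →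
    Good m E d → d.getD nw 0 = dist →
    (∀ p ∈ l, ∃ e ∈ E, pyIdxN m e.1 = nw ∧ e.2.1 = p.1 ∧ e.2.2 = p.2) →
    (∀ p ∈ q, Reach m E (pyIdxN m p.2) p.1 ∧ d.getD (pyIdxN m p.2) 0 ≤ p.1) →
    Good m E df ∧ df.getD nw 0 = dist ∧
    (∀ j, df.getD j 0 ≤ d.getD j 0) ∧
    (∀ p ∈ q, p ∈ qf) ∧
    (∀ p ∈ qf, Reach m E (pyIdxN m p.2) p.1 ∧ df.getD (pyIdxN m p.2) 0 ≤ p.1) ∧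
    (∀ p ∈ l, df.getD (pyIdxN m p.1) 0 ≤ dist + p.2) ∧
    (∀ j, j < m → df.getD j 0 ≠ d.getD j 0 →
      ∃ p ∈ qf, pyIdxN m p.2 = j ∧ p.1 = df.getD j 0) ∧
    (df = d ∧ qf = q ∨ sumNat df < sumNat d) ∧
    qf.length ≤ q.length + l.length := by
  intro l
  induction l with
  | nil =>
    intro d df q qf heq hgood hdn _ hq
    simp only [List.foldl_nil, Prod.mk.injEq] at heq
    obtain ⟨rfl, rfl⟩ := heq
    exact ⟨hgood, hdn, fun j => le_refl _, fun p hp => hp, hq,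
      fun p hp => absurd hp (by simp),
      fun j hj hne => absurd rfl hne,
      Or.inl ⟨rfl, rfl⟩, by omega⟩
  | cons p l ih =>
    intro d df q qf heq hgood hdn hl hq
    rw [List.foldl_cons] at heq
    obtain ⟨e, he, henw, he1, he2⟩ := hl p (by simp)
    have hwp : 0 ≤ p.2 := by have := hw e he; omega
    have hip : pyIdxN m p.1 < m := pyIdxN_lt (by omega) _
    have hagi : aGetI d p.1 = d.getD (pyIdxN m p.1) 0 := by
      simp [aGetI, hgood.len]
    by_cases hrel : dist + p.2 < aGetI d p.1
    · -- relaxation fires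
      have hstep : dikRelax dist (d, q) p =
          (d.set (pyIdxN m p.1) (dist + p.2), q ++ [(dist + p.2, p.1)]) := by
        simp only [dikRelax, if_pos hrel, aSetI, hgood.len]
      rw [hstep] at heq
      rw [hagi] at hrel
      have hiplen : pyIdxN m p.1 < d.length := by rw [hgood.len]; exact hip
      have hreach_ip : Reach m E (pyIdxN m p.1) (dist + p.2) := by
        have hst := Reach.step e hreach he henw
        rw [he1, he2] at hst
        exact hst
      have hgood' : Good m E (d.set (pyIdxN m p.1) (dist + p.2)) := {
        len := by rw [List.length_set, hgood.len]
        d1 := by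
          have hne : (1 : Nat) ≠ pyIdxN m p.1 := by
            intro h
            rw [← h] at hrel
            rw [hgood.d1] at hrel
            omega
          rw [getD_set_ne hne, hgood.d1]
        lb := fun j => by
          by_cases hj : j = pyIdxN m p.1
          · subst hj; rw [getD_set_self hiplen]; omega
          · rw [getD_set_ne hj]; exact hgood.lb j
        ub := fun j => by
          by_cases hj : j = pyIdxN m p.1
          · subst hj; rw [getD_set_self hiplen]
            have := hgood.ub (pyIdxN m p.1); omega
          · rw [getD_set_ne hj]; exact hgood.ub j
        sound := fun j hj => by
          by_cases hje : j = pyIdxN m p.1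
          · subst hje; rw [getD_set_self hiplen]; exact Or.inr hreach_ip
          · rw [getD_set_ne hje]; exact hgood.sound j hj }
      have hdn' : (d.set (pyIdxN m p.1) (dist + p.2)).getD nw 0 = dist := by
        have hne : nw ≠ pyIdxN m p.1 := by
          intro h
          rw [← h, hdn] at hrel
          omega
        rw [getD_set_ne hne, hdn]
      have hmono : ∀ j, (d.set (pyIdxN m p.1) (dist + p.2)).getD j 0 ≤ d.getD j 0 :=
        getD_set_le hiplen (by omega)
      have hq' : ∀ pp ∈ q ++ [(dist + p.2, p.1)],
          Reach m E (pyIdxN m pp.2) pp.1 ∧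
          (d.set (pyIdxN m p.1) (dist + p.2)).getD (pyIdxN m pp.2) 0 ≤ pp.1 := by
        intro pp hpp
        rcases List.mem_append.mp hpp with hpp | hpp
        · obtain ⟨hr, hle⟩ := hq pp hpp
          exact ⟨hr, le_trans (hmono _) hle⟩
        · simp only [List.mem_singleton] at hpp
          subst hpp
          exact ⟨hreach_ip, by rw [getD_set_self hiplen]⟩
      obtain ⟨g1, g2, g3, g4, g5, g6, g7, g8, g9⟩ :=
        ih (d.set (pyIdxN m p.1) (dist + p.2)) df (q ++ [(dist + p.2, p.1)]) qf heq
          hgood' hdn' (fun pp hpp => hl pp (by simp [hpp])) hq'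
      refine ⟨g1, g2, ?_, ?_, g5, ?_, ?_, ?_, ?_⟩
      · exact fun j => le_trans (g3 j) (hmono j)
      · exact fun pp hpp => g4 pp (by simp [hpp])
      · intro pp hpp
        rcases List.mem_cons.mp hpp with hpp | hpp
        · subst hpp
          exact le_trans (g3 _) (le_of_eq (getD_set_self hiplen _ _))
        · exact g6 pp hpp
      · intro j hj hne
        by_cases hch : df.getD j 0 = (d.set (pyIdxN m p.1) (dist + p.2)).getD j 0
        · by_cases hje : j = pyIdxN m p.1
          · subst hje
            refine ⟨(dist + p.2, p.1), g4 _ (by simp), rfl, ?_⟩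
            rw [hch, getD_set_self hiplen]
          · rw [hch, getD_set_ne hje] at hne
            exact absurd rfl hne
        · exact g7 j hj hch
      · right
        have hsum : sumNat (d.set (pyIdxN m p.1) (dist + p.2)) < sumNat d :=
          sumNat_set_lt hiplen (by omega) hrel
        rcases g8 with ⟨hd1, _⟩ | hlt
        · rw [hd1]; exact hsum
        · exact lt_trans hlt hsum
      · simp only [List.length_append, List.length_cons, List.length_nil] at g9 ⊢
        omega
    · -- no relaxation
      have hstep : dikRelax dist (d, q) p = (d, q) := by
        simp only [dikRelax, if_neg hrel]
      rw [hstep] at heq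
      rw [hagi] at hrel
      obtain ⟨g1, g2, g3, g4, g5, g6, g7, g8, g9⟩ :=
        ih d df q qf heq hgood hdn (fun pp hpp => hl pp (by simp [hpp])) hq
      refine ⟨g1, g2, g3, g4, g5, ?_, g7, g8, by simp at g9 ⊢; omega⟩
      intro pp hpp
      rcases List.mem_cons.mp hpp with hpp | hpp
      · subst hpp
        exact le_trans (g3 _) (by omega)
      · exact g6 pp hpp

theorem dikLoop_spec {m : Nat} {E : List (Int × Int × Int)}
    {lt : List (List (Int × Int))} (hm : 2 ≤ m) (hw : ∀ e ∈ E, 0 ≤ e.2.2)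
    (hlen : lt.length = m) (hbuck : ∀ j, lt.getD j [] = bucketOf m j E) :
    ∀ (fuel : Nat) (d : List Int) (q : List (Int × Int)), DInv m E d q →
    sumNat d * (E.length + 2) + q.length < fuel →
    Good m E (dikLoop lt fuel d q) ∧ Stable m E (dikLoop lt fuel d q) := by
  intro fuel
  induction fuel with
  | zero => intro d q _ hfuel; omega
  | succ fuel ih =>
    intro d q inv hfuel
    cases hq : popMin q with
    | none =>
      have hnil := popMin_eq_none hq
      simp only [dikLoop, hq]
      refine ⟨inv.good, fun e he => ?_⟩
      have hje : pyIdxN m e.1 < m := pyIdxN_lt (by omega) _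
      rcases inv.stab _ hje with ⟨p, hp, _⟩ | h2
      · rw [hnil] at hp; simp at hp
      · exact h2 e he rfl
    | some pr =>
      obtain ⟨⟨dist, now⟩, q'⟩ := pr
      have hperm := popMin_perm hq
      have hmemq : ∀ p : Int × Int, p ∈ q ↔ p = (dist, now) ∨ p ∈ q' := by
        intro p
        rw [hperm.mem_iff, List.mem_cons]
      have hqlen : q.length = q'.length + 1 := by
        have := hperm.length_eq; simpa using this
      have hnw : pyIdxN m now < m := pyIdxN_lt (by omega) _
      have hagi : aGetI d now = d.getD (pyIdxN m now) 0 := by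
        simp [aGetI, inv.good.len]
      obtain ⟨hreach, hdle⟩ := inv.qr (dist, now) ((hmemq _).mpr (Or.inl rfl))
      simp only [dikLoop, hq, hagi]
      by_cases hst : d.getD (pyIdxN m now) 0 < dist
      · rw [if_pos hst]
        apply ih
        · refine ⟨inv.good, fun p hp => inv.qr p ((hmemq p).mpr (Or.inr hp)), ?_⟩
          intro j hj
          rcases inv.stab j hj with ⟨p, hp, hpi, hpv⟩ | h2
          · rcases (hmemq p).mp hp with rfl | hp'
            · exfalso
              simp only at hpi hpv
              rw [hpi] at hst
              omega
            · exact Or.inl ⟨p, hp', hpi, hpv⟩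
          · exact Or.inr h2
        · omega
      · rw [if_neg hst]
        have hdn : d.getD (pyIdxN m now) 0 = dist := by simp only at hdle; omega
        have hdist0 : 0 ≤ dist := by have := inv.good.lb (pyIdxN m now); omega
        have hadj : aGetL lt now = bucketOf m (pyIdxN m now) E := by
          simp only [aGetL, hlen]
          exact hbuck _
        rw [hadj]
        have hq'inv : ∀ p ∈ q', Reach m E (pyIdxN m p.2) p.1 ∧
            d.getD (pyIdxN m p.2) 0 ≤ p.1 :=
          fun p hp => inv.qr p ((hmemq p).mpr (Or.inr hp))
        set s := (bucketOf m (pyIdxN m now) E).foldl (dikRelax dist) (d, q') with hs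
        obtain ⟨g1, g2, g3, g4, g5, g6, g7, g8, g9⟩ :=
          relax_fold hm hw hreach hdist0 (bucketOf m (pyIdxN m now) E) d s.1 q' s.2
            (by rw [← hs]) inv.good hdn (fun p hp => mem_bucketOf.mp hp) hq'inv
        apply ih
        · refine ⟨g1, g5, ?_⟩
          intro j hj
          by_cases hch : s.1.getD j 0 = d.getD j 0
          · rcases inv.stab j hj with ⟨p, hp, hpi, hpv⟩ | h2
            · rcases (hmemq p).mp hp with rfl | hp'
              · simp only at hpi hpv
                right
                intro e he hei
                have hmem : (e.2.1, e.2.2) ∈ bucketOf m (pyIdxN m now) E :=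
                  mem_bucketOf.mpr ⟨e, he, by rw [hei, ← hpi], rfl, rfl⟩
                have h6 := g6 _ hmem
                simp only at h6
                rw [hch, ← hpi, hdn]
                exact h6
              · exact Or.inl ⟨p, g4 p hp', hpi, by rw [hch]; exact hpv⟩
            · right
              intro e he hei
              have := h2 e he hei
              have := g3 (pyIdxN m e.2.1)
              rw [hch]
              omega
          · exact Or.inl (g7 j hj hch)
        · have hbl := bucketOf_length_le (m := m) (j := pyIdxN m now) E
          rcases g8 with ⟨hdeq, hqeq⟩ | hlt
          · rw [hdeq, hqeq]
            omega
          · have hmul : (sumNat s.1 + 1) * (E.length + 2) ≤ sumNat d * (E.length + 2) :=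
              Nat.mul_le_mul (by omega) (le_refl _)
            rw [Nat.add_mul, Nat.one_mul] at hmul
            omega

-- ---- Bellman-Ford pass and loop ----

theorem bfPass_fold {m : Nat} {E : List (Int × Int × Int)} (hm : 2 ≤ m)
    (hw : ∀ e ∈ E, 0 ≤ e.2.2) :
    ∀ (l : List (Int × Int × Int)) (d df : List Int) (b bf : Bool),
    l.foldl bfStep (d, b) = (df, bf) →
    (∀ e ∈ l, e ∈ E) → Good m E d →
    Good m E df ∧ sumNat df ≤ sumNat d ∧
    (b = true → bf = true) ∧
    (bf = false → df = d ∧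
      ∀ e ∈ l, d.getD (pyIdxN m e.2.1) 0 ≤ d.getD (pyIdxN m e.1) 0 + e.2.2) ∧
    (bf = true → b = true ∨ sumNat df < sumNat d) := by
  intro l
  induction l with
  | nil =>
    intro d df b bf heq _ hgood
    simp only [List.foldl_nil, Prod.mk.injEq] at heq
    obtain ⟨rfl, rfl⟩ := heq
    exact ⟨hgood, le_refl _, fun h => h, fun _ => ⟨rfl, by simp⟩, fun h => Or.inl h⟩
  | cons e l ih =>
    intro d df b bf heq hE hgood
    rw [List.foldl_cons] at heq
    have hEe : e ∈ E := hE e (by simp)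
    have hwe : 0 ≤ e.2.2 := hw e hEe
    have hia : pyIdxN m e.1 < m := pyIdxN_lt (by omega) _
    have hib : pyIdxN m e.2.1 < m := pyIdxN_lt (by omega) _
    have hga : aGetI d e.1 = d.getD (pyIdxN m e.1) 0 := by simp [aGetI, hgood.len]
    have hgb : aGetI d e.2.1 = d.getD (pyIdxN m e.2.1) 0 := by simp [aGetI, hgood.len]
    by_cases hrel : aGetI d e.1 + e.2.2 < aGetI d e.2.1
    · -- relaxation fires
      rw [hga, hgb] at hrel
      have hstep : bfStep (d, b) e =
          (d.set (pyIdxN m e.2.1) (d.getD (pyIdxN m e.1) 0 + e.2.2), true) := by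
        simp only [bfStep, aSetI, aGetI, hgood.len]
        rw [if_pos hrel]
      rw [hstep] at heq
      have hiblen : pyIdxN m e.2.1 < d.length := by rw [hgood.len]; exact hib
      have hcost0 : 0 ≤ d.getD (pyIdxN m e.1) 0 + e.2.2 := by
        have := hgood.lb (pyIdxN m e.1); omega
      have hreach_b : Reach m E (pyIdxN m e.2.1) (d.getD (pyIdxN m e.1) 0 + e.2.2) := by
        rcases hgood.sound (pyIdxN m e.1) hia with h1e9 | hr
        · exfalso
          have := hgood.ub (pyIdxN m e.2.1)
          rw [h1e9] at hrel
          omega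
        · exact Reach.step e hr hEe rfl
      have hgood' : Good m E (d.set (pyIdxN m e.2.1) (d.getD (pyIdxN m e.1) 0 + e.2.2)) := {
        len := by rw [List.length_set, hgood.len]
        d1 := by
          have hne : (1 : Nat) ≠ pyIdxN m e.2.1 := by
            intro h
            rw [← h, hgood.d1] at hrel
            omega
          rw [getD_set_ne hne, hgood.d1]
        lb := fun j => by
          by_cases hj : j = pyIdxN m e.2.1
          · subst hj; rw [getD_set_self hiblen]; omega
          · rw [getD_set_ne hj]; exact hgood.lb j
        ub := fun j => by
          by_cases hj : j = pyIdxN m e.2.1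
          · subst hj; rw [getD_set_self hiblen]
            have := hgood.ub (pyIdxN m e.2.1); omega
          · rw [getD_set_ne hj]; exact hgood.ub j
        sound := fun j hj => by
          by_cases hje : j = pyIdxN m e.2.1
          · subst hje; rw [getD_set_self hiblen]; exact Or.inr hreach_b
          · rw [getD_set_ne hje]; exact hgood.sound j hj }
      obtain ⟨g1, g2, g3, g4, g5⟩ :=
        ih (d.set (pyIdxN m e.2.1) (d.getD (pyIdxN m e.1) 0 + e.2.2)) df true bf heq
          (fun x hx => hE x (by simp [hx])) hgood'
      have hsum : sumNat (d.set (pyIdxN m e.2.1) (d.getD (pyIdxN m e.1) 0 + e.2.2)) <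
          sumNat d := sumNat_set_lt hiblen hcost0 hrel
      refine ⟨g1, by omega, fun _ => g3 rfl, ?_, fun _ => Or.inr (by omega)⟩
      intro hbf
      rw [g3 rfl] at hbf
      simp at hbf
    · -- no relaxation
      have hstep : bfStep (d, b) e = (d, b) := by
        simp only [bfStep, if_neg hrel]
      rw [hstep] at heq
      rw [hga, hgb] at hrel
      obtain ⟨g1, g2, g3, g4, g5⟩ := ih d df b bf heq (fun x hx => hE x (by simp [hx])) hgood
      refine ⟨g1, g2, g3, ?_, g5⟩
      intro hbf
      obtain ⟨hd, htail⟩ := g4 hbf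
      refine ⟨hd, fun x hx => ?_⟩
      rcases List.mem_cons.mp hx with rfl | hx'
      · omega
      · exact htail x hx'

theorem bfLoop_spec {m : Nat} {E : List (Int × Int × Int)} (hm : 2 ≤ m)
    (hw : ∀ e ∈ E, 0 ≤ e.2.2) :
    ∀ (fuel : Nat) (d : List Int), Good m E d → sumNat d < fuel →
    Good m E (bfLoop E fuel d) ∧ Stable m E (bfLoop E fuel d) := by
  intro fuel
  induction fuel with
  | zero => intro d _ hfuel; omega
  | succ fuel ih =>
    intro d hgood hfuel
    obtain ⟨g1, g2, g3, g4, g5⟩ :=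
      bfPass_fold hm hw E d (bfPass E d).1 false (bfPass E d).2
        (by rw [← bfPass]) (fun x hx => hx) hgood
    cases hb : (bfPass E d).2 with
    | false =>
      simp only [bfLoop, hb]
      obtain ⟨hd, hstab⟩ := g4 hb
      rw [hd]
      exact ⟨hgood, fun e he => hstab e he⟩
    | true =>
      simp only [bfLoop, hb, if_true]
      rcases g5 hb with h | h
      · simp at h
      · exact ih (bfPass E d).1 g1 (by omega)

-- ===== VERDICT (by name: the statement is the Claim_ definition above) =====
theorem solution_spec : Claim_equal_solution := by
  unfold Claim_equal_solution
  intro N road K _ hpre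
  unfold Spec_solution
  obtain ⟨hN, hroad⟩ := hpre
  simp only [solution, solution_alt]
  set m := (N + 1).toNat with hm_def
  have hm : 2 ≤ m := by omega
  have hm0 : 0 < m := by omega
  have hEdges : road.foldl (fun es e => es ++ [(e.1, e.2.1, e.2.2), (e.2.1, e.1, e.2.2)])
      ([] : List (Int × Int × Int)) = Ed road := by
    rw [PySem.List.foldl_append_eq_flatMap]
    simp [Ed]
  have hw : ∀ e ∈ Ed road, 0 ≤ e.2.2 := by
    intro e he
    obtain ⟨r, hr, hcase⟩ := mem_Ed he
    have hwr := (hroad r hr).2.2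
    rcases hcase with rfl | rfl <;> simpa using hwr
  rw [hEdges]
  have hd0eq : aSetI (List.replicate m 1000000000) 1 0 =
      (List.replicate m (1000000000 : Int)).set 1 0 := by
    simp [aSetI, pyIdxN_one hm]
  rw [hd0eq]
  have h1m : 1 < (List.replicate m (1000000000 : Int)).length := by
    simp; omega
  have hgood0 : Good m (Ed road) ((List.replicate m (1000000000 : Int)).set 1 0) := {
    len := by simp
    d1 := getD_set_self h1m 0 0
    lb := fun j => by
      by_cases hj : j = 1
      · subst hj; rw [getD_set_self h1m]
      · rw [getD_set_ne hj, getD_replicate]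
        split <;> omega
    ub := fun j => by
      by_cases hj : j = 1
      · subst hj; rw [getD_set_self h1m]; omega
      · rw [getD_set_ne hj, getD_replicate]
        split <;> omega
    sound := fun j hj => by
      by_cases hj1 : j = 1
      · subst hj1
        rw [getD_set_self h1m]
        exact Or.inr Reach.init
      · rw [getD_set_ne hj1, getD_replicate, if_pos hj]
        exact Or.inl rfl }
  have hsum0 : sumNat ((List.replicate m (1000000000 : Int)).set 1 0) ≤ m * 1000000000 := by
    have hb : ∀ x ∈ (List.replicate m (1000000000 : Int)).set 1 0, x.toNat ≤ 1000000000 := by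
      intro x hx
      rcases List.mem_or_eq_of_mem_set hx with hx' | rfl
      · rw [List.eq_of_mem_replicate hx']; omega
      · omega
    have := sumNat_le hb
    simpa using this
  obtain ⟨hblen, hbget⟩ := build_spec hm0 road (List.replicate m ([] : List (Int × Int)))
    (by simp)
  have hbuck : ∀ j, (road.foldl buildStep (List.replicate m [])).getD j [] =
      bucketOf m j (Ed road) := by
    intro j
    rw [hbget j, getD_replicate]
    split <;> simp
  have hElen : (Ed road).length = 2 * road.length := Ed_length road
  have hinv0 : DInv m (Ed road) ((List.replicate m (1000000000 : Int)).set 1 0) [(0, 1)] := {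
    good := hgood0
    qr := by
      intro p hp
      simp only [List.mem_singleton] at hp
      subst hp
      refine ⟨?_, ?_⟩
      · rw [pyIdxN_one hm]
        exact Reach.init
      · rw [pyIdxN_one hm, hgood0.d1]
    stab := by
      intro j hj
      by_cases hj1 : j = 1
      · subst hj1
        exact Or.inl ⟨(0, 1), by simp, by rw [pyIdxN_one hm], hgood0.d1.symm⟩
      · right
        intro e he hei
        have hub := hgood0.ub (pyIdxN m e.2.1)
        have hwe := hw e he
        have hval : ((List.replicate m (1000000000 : Int)).set 1 0).getD j 0 = 1000000000 := by
          rw [getD_set_ne hj1, getD_replicate, if_pos hj]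
        rw [hval]
        omega }
  have hfuelA : sumNat ((List.replicate m (1000000000 : Int)).set 1 0) *
      ((Ed road).length + 2) + ([((0 : Int), (1 : Int))] : List (Int × Int)).length <
      dikFuel m road.length := by
    have h1 : sumNat ((List.replicate m (1000000000 : Int)).set 1 0) *
        ((Ed road).length + 2) ≤ (m * 1000000000) * ((Ed road).length + 2) :=
      Nat.mul_le_mul hsum0 (le_refl _)
    have h2 : (m * 1000000000 + 1) * ((Ed road).length + 2) =
        (m * 1000000000) * ((Ed road).length + 2) + ((Ed road).length + 2) := by ring
    unfold dikFuel
    rw [show 2 * road.length + 2 = (Ed road).length + 2 from by omega]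
    simp only [List.length_cons, List.length_nil]
    omega
  obtain ⟨hgoodA, hstabA⟩ := dikLoop_spec hm hw hblen hbuck (dikFuel m road.length)
    ((List.replicate m (1000000000 : Int)).set 1 0) [(0, 1)] hinv0 hfuelA
  obtain ⟨hgoodB, hstabB⟩ := bfLoop_spec hm hw (m * 1000000000 + 2)
    ((List.replicate m (1000000000 : Int)).set 1 0) hgood0 (by omega)
  have heq := eq_of_good_stable hw hgoodA hstabA hgoodB hstabB
  rw [heq]
  unfold dikCount
  rw [PySem.List.foldl_ite_add_one]
  simp
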